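-- pv_equiv track=rewrite | github.com/tusharkkp/KuruKshetra_Datapilot | app.py | generate_fallback_sql
-- ===== SOURCE A (Python) =====
-- def generate_fallback_sql(question: str, columns: list) -> str:
--     """
--     Generate a basic SQL query as fallback when Gemini API fails.
--     """
--     question_lower = question.lower()
--
--     # Basic keyword matching for common queries
--     if any(word in question_lower for word in ['average', 'mean', 'avg']):
--         # Look for numeric columns
--         numeric_cols = [col for col in columns if any(keyword in col.lower() for keyword in ['salary', 'price', 'amount', 'value', 'cost', 'revenue', 'income', 'age', 'count', 'number'])]
--         if numeric_cols:
--             if any(word in question_lower for word in ['by', 'group', 'department', 'category', 'region']):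
--                 # Group by analysis
--                 group_cols = [col for col in columns if any(keyword in col.lower() for keyword in ['department', 'category', 'region', 'type', 'group', 'class'])]
--                 if group_cols:
--                     return f"SELECT {group_cols[0]}, AVG({numeric_cols[0]}) as average_{numeric_cols[0]} FROM data GROUP BY {group_cols[0]}"
--                 else:
--                     return f"SELECT AVG({numeric_cols[0]}) as average_{numeric_cols[0]} FROM data"
--             else:
--                 return f"SELECT AVG({numeric_cols[0]}) as average_{numeric_cols[0]} FROM data"
--
--     elif any(word in question_lower for word in ['sum', 'total']):
--         numeric_cols = [col for col in columns if any(keyword in col.lower() for keyword in ['salary', 'price', 'amount', 'value', 'cost', 'revenue', 'income', 'count', 'number'])]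
--         if numeric_cols:
--             if any(word in question_lower for word in ['by', 'group', 'department', 'category', 'region']):
--                 group_cols = [col for col in columns if any(keyword in col.lower() for keyword in ['department', 'category', 'region', 'type', 'group', 'class'])]
--                 if group_cols:
--                     return f"SELECT {group_cols[0]}, SUM({numeric_cols[0]}) as total_{numeric_cols[0]} FROM data GROUP BY {group_cols[0]}"
--                 else:
--                     return f"SELECT SUM({numeric_cols[0]}) as total_{numeric_cols[0]} FROM data"
--
--     elif any(word in question_lower for word in ['count', 'how many', 'number of']):
--         if any(word in question_lower for word in ['by', 'group', 'department', 'category', 'region']):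
--             group_cols = [col for col in columns if any(keyword in col.lower() for keyword in ['department', 'category', 'region', 'type', 'group', 'class'])]
--             if group_cols:
--                 return f"SELECT {group_cols[0]}, COUNT(*) as count FROM data GROUP BY {group_cols[0]}"
--             else:
--                 return "SELECT COUNT(*) as total_count FROM data"
--         else:
--             return "SELECT COUNT(*) as total_count FROM data"
--
--     elif any(word in question_lower for word in ['max', 'maximum', 'highest']):
--         numeric_cols = [col for col in columns if any(keyword in col.lower() for keyword in ['salary', 'price', 'amount', 'value', 'cost', 'revenue', 'income', 'age', 'count', 'number'])]
--         if numeric_cols: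
--             return f"SELECT MAX({numeric_cols[0]}) as max_{numeric_cols[0]} FROM data"
--
--     elif any(word in question_lower for word in ['min', 'minimum', 'lowest']):
--         numeric_cols = [col for col in columns if any(keyword in col.lower() for keyword in ['salary', 'price', 'amount', 'value', 'cost', 'revenue', 'income', 'age', 'count', 'number'])]
--         if numeric_cols:
--             return f"SELECT MIN({numeric_cols[0]}) as min_{numeric_cols[0]} FROM data"
--
--     # Default: return all data
--     return "SELECT * FROM data LIMIT 10"
-- ===== SOURCE B (Python) =====
-- NUM_KW = ['salary', 'price', 'amount', 'value', 'cost', 'revenue', 'income',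
--           'age', 'count', 'number']
-- NUM_KW_NO_AGE = ['salary', 'price', 'amount', 'value', 'cost', 'revenue',
--                  'income', 'count', 'number']
-- GROUP_KW = ['by', 'group', 'department', 'category', 'region']
-- GROUP_COL_KW = ['department', 'category', 'region', 'type', 'group', 'class']
-- DEFAULT = "SELECT * FROM data LIMIT 10"
--
--
-- def _agg(func, label, col, g):
--     """Shared formatter: plain aggregate, or grouped when g is a column."""
--     body = f"{func}({col}) as {label}_{col}"
--     if g is None:
--         return f"SELECT {body} FROM data"
--     return f"SELECT {g}, {body} FROM data GROUP BY {g}"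
--
--
-- def generate_fallback_sql(question: str, columns: list) -> str:
--     # Phase 1: ONE pass over the columns (in reverse, so the last update wins
--     # = the first match in original order), computing every candidate column
--     # any branch could need: first numeric column, first numeric column under
--     # the age-less keyword set, and first group-by column.
--     num = num_na = grp = None
--     for col in reversed(columns):
--         cl = col.lower()
--         if any(k in cl for k in NUM_KW):
--             num = col
--         if any(k in cl for k in NUM_KW_NO_AGE):
--             num_na = col
--         if any(k in cl for k in GROUP_COL_KW):
--             grp = col
--
--     # Phase 2: pure dispatch on the question, no column scanning left.
--     q = question.lower()
--
--     def has(ws):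
--         return any(w in q for w in ws)
--
--     g = grp if has(GROUP_KW) else None
--
--     if has(['average', 'mean', 'avg']):
--         return DEFAULT if num is None else _agg('AVG', 'average', num, g)
--     if has(['sum', 'total']):
--         if num_na is None or not has(GROUP_KW):
--             return DEFAULT
--         return _agg('SUM', 'total', num_na, g)
--     if has(['count', 'how many', 'number of']):
--         if g is None:
--             return "SELECT COUNT(*) as total_count FROM data"
--         return f"SELECT {g}, COUNT(*) as count FROM data GROUP BY {g}"
--     if has(['max', 'maximum', 'highest']):
--         return DEFAULT if num is None else _agg('MAX', 'max', num, None)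
--     if has(['min', 'minimum', 'lowest']):
--         return DEFAULT if num is None else _agg('MIN', 'min', num, None)
--     return DEFAULT
-- ===== Notes on version B (the rewrite author's own statement) =====
-- stated objective: simpler
-- what changed: B splits the work into two phases: one single reversed pass over the columns computes all three candidate columns (first numeric, first age-less numeric, first group column) up front, then a scan-free question dispatch with one shared formatter, whereas A re-scans the column list with fresh comprehensions inside each of five copy-pasted elif branches.
import Mathlib
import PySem

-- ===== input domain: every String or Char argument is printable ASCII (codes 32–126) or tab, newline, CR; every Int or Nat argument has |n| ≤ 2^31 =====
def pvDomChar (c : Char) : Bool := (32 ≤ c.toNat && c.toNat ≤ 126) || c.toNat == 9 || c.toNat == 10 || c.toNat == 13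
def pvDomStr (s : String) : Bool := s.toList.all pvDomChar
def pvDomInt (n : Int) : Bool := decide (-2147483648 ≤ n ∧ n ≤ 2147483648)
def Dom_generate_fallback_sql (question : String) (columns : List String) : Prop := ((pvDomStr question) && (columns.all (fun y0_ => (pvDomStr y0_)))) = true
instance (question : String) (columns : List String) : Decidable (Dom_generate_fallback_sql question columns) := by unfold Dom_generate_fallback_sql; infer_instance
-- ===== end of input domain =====

-- B does one reversed pass over the columns computing all candidate columns up front,
-- then a scan-free question dispatch with one shared formatter (objective: simpler).

-- ===== PORT A =====
-- literal transliteration of A: elif chain; each branch filters columns and indexes [0]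
-- only when the filtered list is nonempty (the match on the filter result is that guard).
def generate_fallback_sql (question : String) (columns : List String) : String :=
  let ql := PySem.Str.lower question
  if (["average", "mean", "avg"].any fun w => PySem.Str.isIn w ql) then
    let numeric_cols := columns.filter fun col =>
      ["salary", "price", "amount", "value", "cost", "revenue", "income", "age", "count", "number"].any
        fun k => PySem.Str.isIn k (PySem.Str.lower col)
    match numeric_cols with
    | [] => "SELECT * FROM data LIMIT 10"
    | n :: _ =>
      if (["by", "group", "department", "category", "region"].any fun w => PySem.Str.isIn w ql) then
        let group_cols := columns.filter fun col =>
          ["department", "category", "region", "type", "group", "class"].any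
            fun k => PySem.Str.isIn k (PySem.Str.lower col)
        match group_cols with
        | [] => "SELECT AVG(" ++ n ++ ") as average_" ++ n ++ " FROM data"
        | g :: _ => "SELECT " ++ g ++ ", AVG(" ++ n ++ ") as average_" ++ n ++ " FROM data GROUP BY " ++ g
      else "SELECT AVG(" ++ n ++ ") as average_" ++ n ++ " FROM data"
  else if (["sum", "total"].any fun w => PySem.Str.isIn w ql) then
    let numeric_cols := columns.filter fun col =>
      ["salary", "price", "amount", "value", "cost", "revenue", "income", "count", "number"].any
        fun k => PySem.Str.isIn k (PySem.Str.lower col)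
    match numeric_cols with
    | [] => "SELECT * FROM data LIMIT 10"
    | n :: _ =>
      if (["by", "group", "department", "category", "region"].any fun w => PySem.Str.isIn w ql) then
        let group_cols := columns.filter fun col =>
          ["department", "category", "region", "type", "group", "class"].any
            fun k => PySem.Str.isIn k (PySem.Str.lower col)
        match group_cols with
        | [] => "SELECT SUM(" ++ n ++ ") as total_" ++ n ++ " FROM data"
        | g :: _ => "SELECT " ++ g ++ ", SUM(" ++ n ++ ") as total_" ++ n ++ " FROM data GROUP BY " ++ g
      else "SELECT * FROM data LIMIT 10"
  else if (["count", "how many", "number of"].any fun w => PySem.Str.isIn w ql) then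
    if (["by", "group", "department", "category", "region"].any fun w => PySem.Str.isIn w ql) then
      let group_cols := columns.filter fun col =>
        ["department", "category", "region", "type", "group", "class"].any
          fun k => PySem.Str.isIn k (PySem.Str.lower col)
      match group_cols with
      | [] => "SELECT COUNT(*) as total_count FROM data"
      | g :: _ => "SELECT " ++ g ++ ", COUNT(*) as count FROM data GROUP BY " ++ g
    else "SELECT COUNT(*) as total_count FROM data"
  else if (["max", "maximum", "highest"].any fun w => PySem.Str.isIn w ql) then
    let numeric_cols := columns.filter fun col =>
      ["salary", "price", "amount", "value", "cost", "revenue", "income", "age", "count", "number"].any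
        fun k => PySem.Str.isIn k (PySem.Str.lower col)
    match numeric_cols with
    | [] => "SELECT * FROM data LIMIT 10"
    | n :: _ => "SELECT MAX(" ++ n ++ ") as max_" ++ n ++ " FROM data"
  else if (["min", "minimum", "lowest"].any fun w => PySem.Str.isIn w ql) then
    let numeric_cols := columns.filter fun col =>
      ["salary", "price", "amount", "value", "cost", "revenue", "income", "age", "count", "number"].any
        fun k => PySem.Str.isIn k (PySem.Str.lower col)
    match numeric_cols with
    | [] => "SELECT * FROM data LIMIT 10"
    | n :: _ => "SELECT MIN(" ++ n ++ ") as min_" ++ n ++ " FROM data"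
  else "SELECT * FROM data LIMIT 10"

-- ===== PORT B =====
def bNumKw : List String :=
  ["salary", "price", "amount", "value", "cost", "revenue", "income", "age", "count", "number"]
def bNumKwNoAge : List String :=
  ["salary", "price", "amount", "value", "cost", "revenue", "income", "count", "number"]
def bGroupKw : List String := ["by", "group", "department", "category", "region"]
def bGroupColKw : List String := ["department", "category", "region", "type", "group", "class"]
def bDefault : String := "SELECT * FROM data LIMIT 10"

-- shared formatter _agg
def bAgg (func label col : String) (g : Option String) : String :=
  let body := func ++ "(" ++ col ++ ") as " ++ label ++ "_" ++ col
  match g with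
  | none => "SELECT " ++ body ++ " FROM data"
  | some g => "SELECT " ++ g ++ ", " ++ body ++ " FROM data GROUP BY " ++ g

-- phase 1: the single reversed pass over the columns (last update = first match)
def bScan (columns : List String) : Option String × Option String × Option String :=
  columns.reverse.foldl
    (fun acc col =>
      let cl := PySem.Str.lower col
      ((if bNumKw.any fun k => PySem.Str.isIn k cl then some col else acc.1),
       (if bNumKwNoAge.any fun k => PySem.Str.isIn k cl then some col else acc.2.1),
       (if bGroupColKw.any fun k => PySem.Str.isIn k cl then some col else acc.2.2)))
    (none, none, none)

def bHas (q : String) (ws : List String) : Bool := ws.any fun w => PySem.Str.isIn w q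

-- phase 2: scan-free dispatch on the question
def generate_fallback_sql_alt (question : String) (columns : List String) : String :=
  let s := bScan columns
  let num := s.1; let numNa := s.2.1; let grp := s.2.2
  let q := PySem.Str.lower question
  let g := if bHas q bGroupKw then grp else none
  if bHas q ["average", "mean", "avg"] then
    match num with | none => bDefault | some n => bAgg "AVG" "average" n g
  else if bHas q ["sum", "total"] then
    match numNa with
    | none => bDefault
    | some n => if !bHas q bGroupKw then bDefault else bAgg "SUM" "total" n g
  else if bHas q ["count", "how many", "number of"] then
    match g with
    | none => "SELECT COUNT(*) as total_count FROM data"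
    | some g => "SELECT " ++ g ++ ", COUNT(*) as count FROM data GROUP BY " ++ g
  else if bHas q ["max", "maximum", "highest"] then
    match num with | none => bDefault | some n => bAgg "MAX" "max" n none
  else if bHas q ["min", "minimum", "lowest"] then
    match num with | none => bDefault | some n => bAgg "MIN" "min" n none
  else bDefault

-- ===== PRECONDITION & SPEC =====
def Spec_generate_fallback_sql (question : String) (columns : List String) (out : String) : Prop := out = generate_fallback_sql_alt question columns
instance (question : String) (columns : List String) (out : String) : Decidable (Spec_generate_fallback_sql question columns out) := by unfold Spec_generate_fallback_sql; infer_instance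

-- ===== CLAIM =====
def Claim_equal_generate_fallback_sql : Prop := ∀ (question : String) (columns : List String), Dom_generate_fallback_sql question columns → Spec_generate_fallback_sql question columns (generate_fallback_sql question columns)

-- ===== LEMMAS AND PROOFS =====

-- the single pass computes exactly the heads of A's three filtered lists
theorem bScan_eq (columns : List String) :
    bScan columns =
      ((columns.filter fun c => bNumKw.any fun k => PySem.Str.isIn k (PySem.Str.lower c)).head?,
       (columns.filter fun c => bNumKwNoAge.any fun k => PySem.Str.isIn k (PySem.Str.lower c)).head?,
       (columns.filter fun c => bGroupColKw.any fun k => PySem.Str.isIn k (PySem.Str.lower c)).head?) := by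
  unfold bScan
  rw [List.foldl_reverse]
  induction columns with
  | nil => rfl
  | cons c t ih =>
    simp only [List.foldr_cons, ih, List.filter_cons]
    split_ifs with h1 h2 h3 <;> simp_all

-- ===== VERDICT =====
set_option maxHeartbeats 1000000 in
theorem generate_fallback_sql_spec : Claim_equal_generate_fallback_sql := by
  intro question columns _
  unfold Spec_generate_fallback_sql generate_fallback_sql generate_fallback_sql_alt
  rw [bScan_eq]
  simp only [bHas, bAgg, bDefault, bNumKw, bNumKwNoAge, bGroupKw, bGroupColKw]
  cases h1 : (["average", "mean", "avg"].any fun w => PySem.Str.isIn w (PySem.Str.lower question)) with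
  | true =>
    cases hN : List.filter (fun col =>
        ["salary", "price", "amount", "value", "cost", "revenue", "income", "age", "count", "number"].any fun k =>
          PySem.Str.isIn k (PySem.Str.lower col)) columns with
    | nil => simp
    | cons n t =>
      cases hg : (["by", "group", "department", "category", "region"].any fun w =>
          PySem.Str.isIn w (PySem.Str.lower question)) with
      | true =>
        cases hG : List.filter (fun col =>
            ["department", "category", "region", "type", "group", "class"].any fun k =>
              PySem.Str.isIn k (PySem.Str.lower col)) columns <;>
          (simp [hG]; try (simp only [String.append_assoc]; rfl))
      | false => (simp; try (simp only [String.append_assoc]; rfl))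
  | false =>
  cases h2 : (["sum", "total"].any fun w => PySem.Str.isIn w (PySem.Str.lower question)) with
  | true =>
    cases hS : List.filter (fun col =>
        ["salary", "price", "amount", "value", "cost", "revenue", "income", "count", "number"].any fun k =>
          PySem.Str.isIn k (PySem.Str.lower col)) columns with
    | nil => simp
    | cons n t =>
      cases hg : (["by", "group", "department", "category", "region"].any fun w =>
          PySem.Str.isIn w (PySem.Str.lower question)) with
      | true =>
        cases hG : List.filter (fun col =>
            ["department", "category", "region", "type", "group", "class"].any fun k =>
              PySem.Str.isIn k (PySem.Str.lower col)) columns <;>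
          (simp [hS, hG]; try (simp only [String.append_assoc]; rfl))
      | false => simp [hS, hg]
  | false =>
  cases h3 : (["count", "how many", "number of"].any fun w => PySem.Str.isIn w (PySem.Str.lower question)) with
  | true =>
    cases hg : (["by", "group", "department", "category", "region"].any fun w =>
        PySem.Str.isIn w (PySem.Str.lower question)) with
    | true =>
      cases hG : List.filter (fun col =>
          ["department", "category", "region", "type", "group", "class"].any fun k =>
            PySem.Str.isIn k (PySem.Str.lower col)) columns <;>
        (simp [hG]; try (simp only [String.append_assoc]; rfl))
    | false => simp [hg]
  | false =>
  cases h4 : (["max", "maximum", "highest"].any fun w => PySem.Str.isIn w (PySem.Str.lower question)) with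
  | true =>
    cases hN : List.filter (fun col =>
        ["salary", "price", "amount", "value", "cost", "revenue", "income", "age", "count", "number"].any fun k =>
          PySem.Str.isIn k (PySem.Str.lower col)) columns <;>
      (simp [hN]; try (simp only [String.append_assoc]; rfl))
  | false =>
  cases h5 : (["min", "minimum", "lowest"].any fun w => PySem.Str.isIn w (PySem.Str.lower question)) with
  | true =>
    cases hN : List.filter (fun col =>
        ["salary", "price", "amount", "value", "cost", "revenue", "income", "age", "count", "number"].any fun k =>
          PySem.Str.isIn k (PySem.Str.lower col)) columns <;>
      (simp [hN]; try (simp only [String.append_assoc]; rfl))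
  | false => simp
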